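-- pv_equiv track=rewrite | github.com/KaedeTai/pondr | pondr/__main__.py | _format_rag_chunks
-- ===== SOURCE A (Python) =====
-- def _format_rag_chunks(chunks: list[dict], max_chars: int = 800) -> str:
--     out = []
--     used = 0
--     for c in chunks or []:
--         doc = (c.get("doc") or "").strip()
--         if not doc:
--             continue
--         snippet = doc[:240].replace("\n", " ")
--         line = f"- (id={c.get('id','')[:8]}) {snippet}"
--         if used + len(line) > max_chars:
--             break
--         out.append(line)
--         used += len(line)
--     return "\n".join(out) or "(none)"
-- ===== SOURCE B (Python) =====
-- def _format_rag_chunks(chunks: list[dict], max_chars: int = 800) -> str: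
--     # Pass 1: format every usable chunk into its line.
--     lines = []
--     for c in chunks or []:
--         doc = (c.get("doc") or "").strip()
--         if doc:
--             snippet = doc[:240].replace("\n", " ")
--             lines.append(f"- (id={c.get('id','')[:8]}) {snippet}")
--     # Pass 2: running prefix sums of line lengths, then cut at the budget.
--     totals = []
--     run = 0
--     for ln in lines:
--         run += len(ln)
--         totals.append(run)
--     k = 0
--     while k < len(totals) and totals[k] <= max_chars:
--         k += 1
--     return "\n".join(lines[:k]) or "(none)"
-- ===== Notes on version B (the rewrite author's own statement) =====
-- stated objective: alternative
-- what changed: A's single loop that interleaves formatting with the running budget (break inside) is split into build-all-lines, a prefix-sum pass over line lengths, and a cut at the first total exceeding max_chars, joining the kept prefix.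
import Mathlib
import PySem

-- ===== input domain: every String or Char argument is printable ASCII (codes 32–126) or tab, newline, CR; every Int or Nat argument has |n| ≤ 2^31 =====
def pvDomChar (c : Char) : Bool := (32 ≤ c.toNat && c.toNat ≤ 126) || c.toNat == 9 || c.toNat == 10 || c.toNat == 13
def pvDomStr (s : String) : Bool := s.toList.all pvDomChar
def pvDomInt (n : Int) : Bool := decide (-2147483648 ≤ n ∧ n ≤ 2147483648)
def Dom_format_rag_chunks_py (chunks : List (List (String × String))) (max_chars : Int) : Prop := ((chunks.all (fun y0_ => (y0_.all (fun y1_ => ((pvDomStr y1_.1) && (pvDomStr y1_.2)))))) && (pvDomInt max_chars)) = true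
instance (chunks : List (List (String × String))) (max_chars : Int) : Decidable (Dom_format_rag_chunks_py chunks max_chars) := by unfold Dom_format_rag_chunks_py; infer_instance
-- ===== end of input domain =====

-- B replaces A's interleaved format-and-budget loop by build-all-lines, prefix sums, cut at the
-- budget (objective: alternative decomposition, same cost).

-- ===== PORT A =====
-- shared per-chunk formatting (identical expressions in A and B):
-- (c.get("doc") or "").strip()
def pvDocOf (c : List (String × String)) : String :=
  PySem.Str.strip (((PySem.Dict.mk c).get? "doc").getD "")
-- f"- (id={c.get('id','')[:8]}) {doc[:240].replace('\n',' ')}"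
def pvLineOf (c : List (String × String)) : String :=
  let snippet := PySem.Str.replace (PySem.Str.slice (pvDocOf c) none (some 240)) "\n" " "
  "- (id=" ++ PySem.Str.slice (((PySem.Dict.mk c).get? "id").getD "") none (some 8) ++ ") " ++ snippet

-- A's single loop: skip empty docs, stop (break) at the first line that would exceed the budget
def pvALoop (max_chars : Int) : List (List (String × String)) → Int → List String
  | [], _ => []
  | c :: rest, used =>
    let doc := pvDocOf c
    if doc = "" then pvALoop max_chars rest used
    else
      let line := pvLineOf c
      if used + (PySem.Str.len line : Int) > max_chars then []
      else line :: pvALoop max_chars rest (used + (PySem.Str.len line : Int))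

def format_rag_chunks_py (chunks : List (List (String × String))) (max_chars : Int) : String :=
  let s := PySem.Str.join "\n" (pvALoop max_chars chunks 0)
  if s = "" then "(none)" else s

-- ===== PORT B =====
-- pass 1: all formatted lines
def pvBLines : List (List (String × String)) → List String
  | [] => []
  | c :: rest =>
    let doc := pvDocOf c
    if doc = "" then pvBLines rest else pvLineOf c :: pvBLines rest

-- pass 2a: running prefix sums of line lengths
def pvBTotals (run : Int) : List String → List Int
  | [] => []
  | ln :: rest => (run + (PySem.Str.len ln : Int)) :: pvBTotals (run + (PySem.Str.len ln : Int)) rest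

-- pass 2b: length of the maximal prefix within budget (the while loop)
def pvBCount (max_chars : Int) : List Int → Nat
  | [] => 0
  | t :: rest => if t ≤ max_chars then 1 + pvBCount max_chars rest else 0

def format_rag_chunks_py_alt (chunks : List (List (String × String))) (max_chars : Int) : String :=
  let lines := pvBLines chunks
  let k := pvBCount max_chars (pvBTotals 0 lines)
  let s := PySem.Str.join "\n" (lines.take k)
  if s = "" then "(none)" else s

-- ===== PRECONDITION & SPEC =====
def Spec_format_rag_chunks_py (chunks : List (List (String × String))) (max_chars : Int) (out : String) : Prop := out = format_rag_chunks_py_alt chunks max_chars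
instance (chunks : List (List (String × String))) (max_chars : Int) (out : String) : Decidable (Spec_format_rag_chunks_py chunks max_chars out) := by unfold Spec_format_rag_chunks_py; infer_instance

-- ===== CLAIM (what is proved, stated in full; the proofs are below) =====
def Claim_equal_format_rag_chunks_py : Prop := ∀ (chunks : List (List (String × String))) (max_chars : Int), Dom_format_rag_chunks_py chunks max_chars → Spec_format_rag_chunks_py chunks max_chars (format_rag_chunks_py chunks max_chars)

-- ===== LEMMAS AND PROOFS =====
-- A's loop computes exactly the budget-cut prefix of B's line list, for any starting budget use
theorem pvALoop_eq_take (max_chars : Int) (l : List (List (String × String))) :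
    ∀ used : Int, pvALoop max_chars l used
      = (pvBLines l).take (pvBCount max_chars (pvBTotals used (pvBLines l))) := by
  induction l with
  | nil => intro used; rfl
  | cons c rest ih =>
    intro used
    by_cases hdoc : pvDocOf c = ""
    · simp only [pvALoop, pvBLines, hdoc, if_true, ih]
    · by_cases hbud : used + (PySem.Str.len (pvLineOf c) : Int) > max_chars
      · simp only [pvALoop, pvBLines, pvBTotals, pvBCount, if_neg hdoc,
          if_pos hbud, if_neg (not_le.mpr hbud), List.take_zero]
      · simp only [pvALoop, pvBLines, pvBTotals, pvBCount, if_neg hdoc,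
          if_neg hbud, if_pos (not_lt.mp hbud), ih]
        rw [Nat.add_comm, List.take_succ_cons]

-- ===== VERDICT (by name: the statement is the Claim_ definition above) =====
theorem format_rag_chunks_py_spec : Claim_equal_format_rag_chunks_py := by
  intro chunks max_chars _
  unfold Spec_format_rag_chunks_py format_rag_chunks_py format_rag_chunks_py_alt
  rw [pvALoop_eq_take]
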